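-- pv_equiv track=rewrite | github.com/AJBats/saturn-daytona-usa-re | tools/generate_l3_tu.py | compute_ranges
-- ===== SOURCE A (Python) =====
-- def compute_ranges(coverage):
--     """Find contiguous ranges of covered bytes from the coverage mask.
--
--     Returns a list of (start_off, end_off) tuples for each contiguous covered
--     region.  Offsets are relative to TU_START.
--     """
--     ranges = []
--     in_range = False
--     start = 0
--     for i in range(len(coverage)):
--         if coverage[i] and not in_range:
--             start = i
--             in_range = True
--         elif not coverage[i] and in_range:
--             ranges.append((start, i))
--             in_range = False
--     if in_range:
--         ranges.append((start, len(coverage)))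
--     return ranges
-- ===== SOURCE B (Python) =====
-- def compute_ranges(coverage):
--     """Find contiguous ranges of covered bytes from the coverage mask.
--
--     Boundary-scan formulation: pad the boolean mask with False on both
--     sides, collect run starts (False->True edges) and run ends
--     (True->False edges) in two comprehensions, and zip them.
--     """
--     b = [bool(x) for x in coverage]
--     padded = [False] + b + [False]
--     starts = [i for i in range(len(b)) if padded[i + 1] and not padded[i]]
--     ends = [i for i in range(1, len(b) + 1) if padded[i] and not padded[i + 1]]
--     return list(zip(starts, ends))
-- ===== Notes on version B (the rewrite author's own statement) =====
-- stated objective: alternative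
-- what changed: Replaces the stateful in_range/start accumulator loop by a boundary scan: pad the boolean mask with False, collect rising-edge indices (starts) and falling-edge indices (ends) in two comprehensions, and zip them.
import Mathlib
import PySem

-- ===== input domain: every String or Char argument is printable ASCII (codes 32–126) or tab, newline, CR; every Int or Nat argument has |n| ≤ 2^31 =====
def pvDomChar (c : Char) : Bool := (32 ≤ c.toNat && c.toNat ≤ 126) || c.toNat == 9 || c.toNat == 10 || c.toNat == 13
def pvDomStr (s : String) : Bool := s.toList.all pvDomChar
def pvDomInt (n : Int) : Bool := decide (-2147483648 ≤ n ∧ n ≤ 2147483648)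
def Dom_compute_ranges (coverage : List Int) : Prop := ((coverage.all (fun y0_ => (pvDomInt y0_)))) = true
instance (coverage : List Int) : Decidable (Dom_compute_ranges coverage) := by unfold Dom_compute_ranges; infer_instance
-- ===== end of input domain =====

-- B replaces A's stateful in_range loop by a padded boundary scan (starts/ends edge lists zipped); alternative decomposition, same O(n) cost.

-- ===== PORT A =====
-- A's state: (ranges, in_range, start); loop over range(len(coverage)), truthiness of coverage[i] is (· != 0).
def compute_ranges (coverage : List Int) : List (Int × Int) :=
  let step : (List (Int × Int) × Bool × Int) → Int → (List (Int × Int) × Bool × Int) :=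
    fun st i =>
      let c := PySem.List.pyGetD coverage i 0
      if (c != 0) && !st.2.1 then (st.1, true, i)
      else if !(c != 0) && st.2.1 then (st.1 ++ [(st.2.2, i)], false, st.2.2)
      else st
  let r := (PySem.List.pyRange 0 (coverage.length : Int) 1).foldl step ([], false, 0)
  if r.2.1 then r.1 ++ [(r.2.2, (coverage.length : Int))] else r.1

-- ===== PORT B =====
def compute_ranges_alt (coverage : List Int) : List (Int × Int) :=
  let b : List Bool := coverage.map (fun x => x != 0)
  let padded : List Bool := [false] ++ b ++ [false]
  let starts : List Int := ((List.range b.length).filter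
      (fun i => padded.getD (i+1) false && !(padded.getD i false))).map (fun i => (i : Int))
  let ends : List Int := (((List.range b.length).map (fun i => i+1)).filter
      (fun i => padded.getD i false && !(padded.getD (i+1) false))).map (fun i => (i : Int))
  starts.zip ends

-- ===== PRECONDITION & SPEC =====
def Spec_compute_ranges (coverage : List Int) (out : List (Int × Int)) : Prop := out = compute_ranges_alt coverage
instance (coverage : List Int) (out : List (Int × Int)) : Decidable (Spec_compute_ranges coverage out) := by unfold Spec_compute_ranges; infer_instance

-- ===== CLAIM (what is proved, stated in full; the proofs are below) =====
def Claim_equal_compute_ranges : Prop := ∀ (coverage : List Int), Dom_compute_ranges coverage → Spec_compute_ranges coverage (compute_ranges coverage)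

-- ===== LEMMAS AND PROOFS =====

-- A's loop as a structural recursion over the boolean mask, carrying the absolute index k.
def pvRunA (acc : List (Int × Int)) (ir : Bool) (st : Int) (bs : List Bool) (k : Int) : List (Int × Int) :=
  match bs with
  | [] => if ir then acc ++ [(st, k)] else acc
  | c :: t =>
    if c && !ir then pvRunA acc true k t (k+1)
    else if !c && ir then pvRunA (acc ++ [(st, k)]) false st t (k+1)
    else pvRunA acc ir st t (k+1)

-- rising edges (run starts), look-behind form, absolute positions from k
def pvStarts (prev : Bool) (bs : List Bool) (k : Int) : List Int :=
  match bs with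
  | [] => []
  | c :: t => (if c && !prev then [k] else []) ++ pvStarts c t (k+1)

-- falling edges (run ends), look-behind form, absolute positions from k
def pvEnds (prev : Bool) (bs : List Bool) (k : Int) : List Int :=
  match bs with
  | [] => if prev then [k] else []
  | c :: t => (if prev && !c then [k] else []) ++ pvEnds c t (k+1)

-- total lookup into the padded mask (out of range = False), used to state B's filters
def pvNth : List Bool → Nat → Bool
  | [], _ => false
  | c :: _, 0 => c
  | _ :: t, i + 1 => pvNth t i

-- B's starts as a filter over indices (with explicit previous value prev at the padding position)
def pvBS (prev : Bool) (bs : List Bool) : List Nat :=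
  (List.range bs.length).filter
    (fun i => pvNth (prev :: bs ++ [false]) (i+1) && !pvNth (prev :: bs ++ [false]) i)

-- B's ends as a filter over indices 1..n (the leading pad value is never read)
def pvBE (bs : List Bool) : List Nat :=
  ((List.range bs.length).map (fun i => i+1)).filter
    (fun i => pvNth (false :: bs ++ [false]) i && !pvNth (false :: bs ++ [false]) (i+1))

theorem pvNth_eq_getD (l : List Bool) : ∀ i : Nat, l.getD i false = pvNth l i := by
  induction l with
  | nil => intro i; simp [pvNth]
  | cons c t ih => intro i; cases i with
    | zero => simp [pvNth]
    | succ n => simpa [pvNth] using ih n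

theorem pvNth_eq_getElem (l : List Bool) (i : Nat) : l[i]?.getD false = pvNth l i :=
  pvNth_eq_getD l i

theorem pvRunA_eq (bs : List Bool) : ∀ (acc : List (Int × Int)) (ir : Bool) (st k : Int),
    pvRunA acc ir st bs k
      = acc ++ ((if ir then [st] else []) ++ pvStarts ir bs k).zip (pvEnds ir bs k) := by
  induction bs with
  | nil =>
    intro acc ir st k
    cases ir <;> simp [pvRunA, pvStarts, pvEnds]
  | cons c t ih =>
    intro acc ir st k
    cases c <;> cases ir <;>
      simp [pvRunA, pvStarts, pvEnds, ih, List.zip_cons_cons, List.append_assoc]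

theorem pvHead_append (t : List Bool) : pvNth (t ++ [false]) 0 = t.headD false := by
  cases t <;> rfl

theorem pvBS_cons (prev c : Bool) (t : List Bool) :
    pvBS prev (c :: t) = (if c && !prev then [0] else []) ++ (pvBS c t).map (· + 1) := by
  unfold pvBS
  rw [show (c :: t).length = t.length + 1 from rfl, List.range_succ_eq_map, List.filter_cons,
    List.filter_map]
  have hp : ((fun i => pvNth (prev :: c :: t ++ [false]) (i+1)
        && !pvNth (prev :: c :: t ++ [false]) i) ∘ Nat.succ)
      = (fun i => pvNth (c :: t ++ [false]) (i+1) && !pvNth (c :: t ++ [false]) i) := by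
    funext i; simp [Function.comp, pvNth]
  rw [hp, show (pvNth (prev :: c :: t ++ [false]) (0 + 1) && !pvNth (prev :: c :: t ++ [false]) 0)
      = (c && !prev) from rfl]
  split <;> rfl

theorem pvBE_cons (c : Bool) (t : List Bool) :
    pvBE (c :: t) = (if c && !(t.headD false) then [1] else []) ++ (pvBE t).map (· + 1) := by
  unfold pvBE
  rw [show (c :: t).length = t.length + 1 from rfl, List.range_succ_eq_map]
  rw [show ((0 :: (List.range t.length).map Nat.succ).map (fun i => i + 1))
        = 1 :: (((List.range t.length).map (fun i => i+1)).map (fun i => i + 1)) by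
      simp [List.map_map]]
  rw [List.filter_cons, List.filter_map]
  have hcongr : ((List.range t.length).map (fun i => i+1)).filter
      ((fun i => pvNth (false :: c :: t ++ [false]) i
          && !pvNth (false :: c :: t ++ [false]) (i+1)) ∘ (fun i => i + 1))
      = ((List.range t.length).map (fun i => i+1)).filter
      (fun i => pvNth (false :: t ++ [false]) i && !pvNth (false :: t ++ [false]) (i+1)) := by
    apply List.filter_congr
    intro i hi
    rcases List.mem_map.mp hi with ⟨j, _, rfl⟩
    simp [Function.comp, pvNth]
  rw [hcongr]
  have h1 : (pvNth (false :: c :: t ++ [false]) 1 && !pvNth (false :: c :: t ++ [false]) 2)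
      = (c && !(t.headD false)) := by
    rw [show (pvNth (false :: c :: t ++ [false]) 1 && !pvNth (false :: c :: t ++ [false]) 2)
        = (c && !pvNth (t ++ [false]) 0) from rfl, pvHead_append t]
  rw [h1]
  split <;> rfl

theorem pvStarts_eq (bs : List Bool) : ∀ (prev : Bool) (k : Int),
    pvStarts prev bs k = (pvBS prev bs).map (fun i : Nat => k + (i : Int)) := by
  induction bs with
  | nil => intro prev k; simp [pvStarts, pvBS]
  | cons c t ih =>
    intro prev k
    rw [pvBS_cons]
    simp only [pvStarts, ih c (k+1)]
    have hm : List.map (fun i : Nat => k + 1 + (i : Int)) (pvBS c t)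
        = List.map (fun i : Nat => k + (i : Int)) ((pvBS c t).map (fun x => x + 1)) := by
      rw [List.map_map]
      apply List.map_congr_left
      intro i _
      simp only [Function.comp_apply]
      push_cast
      ring
    rw [show (fun i : Nat => (k + 1 : Int) + (i : Int)) = (fun i : Nat => k + 1 + (i : Int)) from rfl,
      hm, List.map_append]
    cases h : (c && !prev) <;> simp

theorem pvEnds_eq (bs : List Bool) : ∀ (prev : Bool) (k : Int),
    pvEnds prev bs k = (if prev && !(bs.headD false) then [k] else [])
      ++ (pvBE bs).map (fun i : Nat => k + (i : Int)) := by
  induction bs with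
  | nil => intro prev k; cases prev <;> simp [pvEnds, pvBE]
  | cons c t ih =>
    intro prev k
    simp only [pvEnds, List.headD_cons]
    rw [ih c (k+1), pvBE_cons]
    have hm : List.map (fun i : Nat => k + 1 + (i : Int)) (pvBE t)
        = List.map (fun i : Nat => k + (i : Int)) ((pvBE t).map (fun x => x + 1)) := by
      rw [List.map_map]
      apply List.map_congr_left
      intro i _
      simp only [Function.comp_apply]
      push_cast
      ring
    have hone : List.map (fun i : Nat => k + (i : Int)) [1] = [k + 1] := by simp
    rw [show (fun i : Nat => (k + 1 : Int) + (i : Int)) = (fun i : Nat => k + 1 + (i : Int)) from rfl,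
      hm, List.map_append, ← List.append_assoc]
    cases h : (c && !(t.headD false)) <;> simp

-- A's loop step and the closing append, as named functions
def pvStep (a : List (Int × Int) × Bool × Int) (p : Int × Int) : List (Int × Int) × Bool × Int :=
  if (p.2 != 0) && !a.2.1 then (a.1, true, p.1)
  else if !(p.2 != 0) && a.2.1 then (a.1 ++ [(a.2.2, p.1)], false, a.2.2)
  else a

def pvFin (k : Int) (r : List (Int × Int) × Bool × Int) : List (Int × Int) :=
  if r.2.1 then r.1 ++ [(r.2.2, k)] else r.1

-- A's fold over enumerated indices (plus the closing append) equals pvRunA on the boolean mask.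
theorem pvFold_eq (xs : List Int) : ∀ (k : Int) (acc : List (Int × Int)) (ir : Bool) (st : Int),
    pvFin (k + (xs.length : Int)) ((PySem.List.enumerate xs k).foldl pvStep (acc, ir, st))
      = pvRunA acc ir st (xs.map (fun x => x != 0)) k := by
  induction xs with
  | nil =>
    intro k acc ir st
    cases ir <;> simp [PySem.List.enumerate_nil, pvRunA, pvFin]
  | cons x t ih =>
    intro k acc ir st
    rw [PySem.List.enumerate_cons, List.map_cons, List.foldl_cons]
    have hlen : k + ((x :: t).length : Int) = (k + 1) + (t.length : Int) := by
      push_cast [List.length_cons]; ring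
    rw [hlen]
    by_cases hx : (x != 0) = true
    · cases ir
      · rw [show pvStep (acc, false, st) (k, x) = (acc, true, k) from by simp [pvStep, hx]]
        rw [ih (k+1) acc true k]
        simp [pvRunA, hx]
      · rw [show pvStep (acc, true, st) (k, x) = (acc, true, st) from by simp [pvStep, hx]]
        rw [ih (k+1) acc true st]
        simp [pvRunA, hx]
    · have hx' : (x != 0) = false := by revert hx; cases (x != 0) <;> simp
      cases ir
      · rw [show pvStep (acc, false, st) (k, x) = (acc, false, st) from by simp [pvStep, hx']]
        rw [ih (k+1) acc false st]
        simp [pvRunA, hx']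
      · rw [show pvStep (acc, true, st) (k, x) = (acc ++ [(st, k)], false, st) from by
          simp [pvStep, hx']]
        rw [ih (k+1) (acc ++ [(st, k)]) false st]
        simp [pvRunA, hx']

-- ===== VERDICT (by name: the statement is the Claim_ definition above) =====
theorem compute_ranges_spec : Claim_equal_compute_ranges := by
  intro coverage _
  unfold Spec_compute_ranges compute_ranges compute_ranges_alt
  simp only []
  rw [show (PySem.List.pyRange 0 (coverage.length : Int) 1).foldl
        (fun (st : List (Int × Int) × Bool × Int) (i : Int) =>
          let c := PySem.List.pyGetD coverage i 0
          if (c != 0) && !st.2.1 then (st.1, true, i)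
          else if !(c != 0) && st.2.1 then (st.1 ++ [(st.2.2, i)], false, st.2.2)
          else st) ([], false, 0)
      = (PySem.List.enumerate coverage 0).foldl pvStep ([], false, 0) from by
    rw [PySem.List.enumerate_eq_map_pyRange coverage 0, List.foldl_map]
    simp [pvStep]]
  have h0 := pvFold_eq coverage 0 [] false 0
  simp only [zero_add, pvFin] at h0
  rw [h0, pvRunA_eq, pvStarts_eq, pvEnds_eq]
  simp [pvNth_eq_getElem, pvBS, pvBE, pvNth]
  simp [← List.map_eq_flatMap]
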